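-- pv_equiv track=rewrite | github.com/Kesamreddyprashanthreddy/Leetcode | 3142-longest-unequal-adjacent-groups-subsequence-ii/longest-unequal-adjacent-groups-subsequence-ii.py | getWordsInLongestSubsequence
-- ===== SOURCE A (Python) =====
-- from typing import List
--
-- def getWordsInLongestSubsequence(words: List[str], groups: List[int]) -> List[str]:
--     n = len(words)
--     dp = [[1,i] for i in range(n)]
--     def dist(s1, s2):
--         d = 0
--         for c1, c2 in zip(s1, s2):
--             if c1 != c2:
--                 d += 1
--         return d
--     for i in range(1, n):
--         max_len, max_i = -1, -1
--         for j in range(i):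
--             if groups[i] == groups[j] or len(words[i]) != len(words[j]) or dist(words[i], words[j]) != 1:
--                 continue
--             if dp[j][0] > max_len:
--                 max_len = dp[j][0]
--                 max_i = j
--         if max_len != -1:
--             dp[i][0] = max_len + 1
--             dp[i][1] = max_i
--     max_d = [-1,-1]
--     max_i = -1
--     for i, d in enumerate(dp):
--         if d[0] > max_d[0]:
--             max_d = d
--             max_i = i
--     ans = [words[max_i]]
--     i = max_i
--     while i != max_d[1]:
--         i = max_d[1]
--         max_d = dp[i]
--         ans.append(words[i])
--     return ans[::-1]
-- ===== SOURCE B (Python) =====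
-- from typing import List
--
-- def getWordsInLongestSubsequence(words: List[str], groups: List[int]) -> List[str]:
--     # Word-ladder bucket adjacency: index earlier words by (position, prefix, suffix)
--     # wildcard keys, so each index i only inspects its true hamming-distance-1
--     # neighbours instead of scanning all previous pairs.
--     n = len(words)
--     buckets = {}
--     dp = [1] * n
--     parent = list(range(n))
--     for i in range(n):
--         w = words[i]
--         keys = [(k, w[:k], w[k + 1:]) for k in range(len(w))]
--         cand = []
--         for k, pre, suf in keys:
--             for j in buckets.get((k, pre, suf), []):
--                 if words[j][k] != w[k] and groups[j] != groups[i]: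
--                     cand.append(j)
--         if cand:
--             m = max(dp[j] for j in cand)
--             dp[i] = m + 1
--             parent[i] = min(j for j in cand if dp[j] == m)
--         for key in keys:
--             buckets.setdefault(key, []).append(i)
--     best = dp.index(max(dp))
--     out = []
--     i = best
--     while True:
--         out.append(words[i])
--         if parent[i] == i:
--             break
--         i = parent[i]
--     return out[::-1]
-- ===== Notes on version B (the rewrite author's own statement) =====
-- stated objective: faster
-- what changed: Replaces A's all-pairs O(n^2*L) hamming-distance scan by a (position,prefix,suffix) wildcard-bucket index (word-ladder adjacency) so the DP only visits actual distance-1 neighbours, taking max/argmin over that edge list.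
import Mathlib
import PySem

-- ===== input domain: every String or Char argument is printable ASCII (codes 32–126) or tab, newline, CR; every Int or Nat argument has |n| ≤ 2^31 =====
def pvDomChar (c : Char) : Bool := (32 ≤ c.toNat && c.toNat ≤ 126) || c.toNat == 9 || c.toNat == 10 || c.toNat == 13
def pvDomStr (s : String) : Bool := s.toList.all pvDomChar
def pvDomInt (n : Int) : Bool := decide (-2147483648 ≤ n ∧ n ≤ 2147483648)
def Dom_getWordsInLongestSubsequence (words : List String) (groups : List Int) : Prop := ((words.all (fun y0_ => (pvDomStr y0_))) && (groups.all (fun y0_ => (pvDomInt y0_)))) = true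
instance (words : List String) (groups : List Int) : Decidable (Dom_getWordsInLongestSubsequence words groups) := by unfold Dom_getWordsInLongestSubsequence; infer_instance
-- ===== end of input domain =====

-- B replaces A's all-pairs O(n^2*L) distance scan by a (position, prefix, suffix)
-- wildcard-bucket adjacency index (word-ladder graph) and runs the same DP over the
-- discovered edges only; return values are proved identical on Pre_.

-- ===== PORT A =====
-- dist(s1, s2): zip-prefix hamming distance
def pvDistA (s1 s2 : String) : Int :=
  (List.zip s1.toList s2.toList).foldl (fun d c => if c.1 ≠ c.2 then d + 1 else d) 0

-- body of 'for i in range(1, n)': inner j-scan computing (max_len, max_i), then dp update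
def pvStepA (words : List String) (groups : List Int) (dp : List (Int × Int)) (i : Nat) : List (Int × Int) :=
  let s := (List.range i).foldl (fun s j =>
      if groups.getD i 0 == groups.getD j 0
          || !((words.getD i "").toList.length == (words.getD j "").toList.length)
          || !(pvDistA (words.getD i "") (words.getD j "") == 1) then s
      else if (dp.getD j (1, 0)).1 > s.1 then ((dp.getD j (1, 0)).1, (j : Int)) else s)
    ((-1 : Int), (-1 : Int))
  if !(s.1 == -1) then dp.set i (s.1 + 1, s.2) else dp

-- the final 'while i != max_d[1]' reconstruction loop (fuel = n, enough since parents decrease)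
def pvBackA (words : List String) (dp : List (Int × Int)) : Nat → Int → Int × Int → List String → List String
  | 0, _, _, ans => ans
  | fuel + 1, i, md, ans =>
    if i == md.2 then ans
    else pvBackA words dp fuel md.2 (dp.getD md.2.toNat (1, 0)) (ans ++ [words.getD md.2.toNat ""])

def getWordsInLongestSubsequence (words : List String) (groups : List Int) : List String :=
  let n := words.length
  let dp0 : List (Int × Int) := (List.range n).map (fun (i : Nat) => ((1 : Int), (i : Int)))
  let dp := (List.range' 1 (n - 1)).foldl (pvStepA words groups) dp0
  -- 'for i, d in enumerate(dp): if d[0] > max_d[0]: …'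
  let fin := (PySem.List.enumerate dp).foldl
      (fun (s : (Int × Int) × Int) p => if p.2.1 > s.1.1 then (p.2, p.1) else s)
      (((-1 : Int), (-1 : Int)), (-1 : Int))
  let maxD := fin.1
  let maxI := fin.2
  (pvBackA words dp n maxI maxD [words.getD maxI.toNat ""]).reverse

-- ===== PORT B =====
-- wildcard keys of a word: (k, w[:k], w[k+1:]) for each position k
def pvKeysB (w : List Char) : List (Nat × List Char × List Char) :=
  (List.range w.length).map (fun k => (k, w.take k, w.drop (k + 1)))

-- candidate predecessors of word i: bucket lookups filtered to true hamming-1, group-differing js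
def pvCandB (words : List String) (groups : List Int)
    (bk : PySem.Dict (Nat × List Char × List Char) (List Nat)) (i : Nat) : List Nat :=
  (pvKeysB ((words.getD i "").toList)).flatMap (fun key =>
    (bk.getD key []).filter (fun j =>
      !((words.getD j "").toList.getD key.1 ' ' == ((words.getD i "").toList).getD key.1 ' ')
        && !(groups.getD j 0 == groups.getD i 0)))

-- body of B's main loop: bucket lookup -> candidate predecessors -> dp/parent update -> register i
def pvStepB (words : List String) (groups : List Int)
    (st : PySem.Dict (Nat × List Char × List Char) (List Nat) × List Int × List Nat) (i : Nat) :
    PySem.Dict (Nat × List Char × List Char) (List Nat) × List Int × List Nat :=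
  let bk := st.1
  let dp := st.2.1
  let par := st.2.2
  let cand := pvCandB words groups bk i
  -- 'buckets.setdefault(key, []).append(i)' = modify key [] (· ++ [i])
  let bk' := (pvKeysB ((words.getD i "").toList)).foldl (fun d key => d.modify key [] (· ++ [i])) bk
  if cand.isEmpty then (bk', dp, par)
  else
    let m := (PySem.List.max? (cand.map (fun j => dp.getD j 1)) (fun x => x)).getD 0
    let dp' := dp.set i (m + 1)
    let p := (PySem.List.min? (cand.filter (fun j => dp'.getD j 1 == m)) (fun x => x)).getD 0
    (bk', dp', par.set i p)

-- B's 'while True: append; if parent[i] == i: break; i = parent[i]' (fuel = n)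
def pvBackB (words : List String) (par : List Nat) : Nat → Nat → List String → List String
  | 0, _, out => out
  | fuel + 1, i, out =>
    let out' := out ++ [words.getD i ""]
    if par.getD i i == i then out' else pvBackB words par fuel (par.getD i i) out'

def getWordsInLongestSubsequence_alt (words : List String) (groups : List Int) : List String :=
  let n := words.length
  let st := (List.range n).foldl (pvStepB words groups)
      (PySem.Dict.empty, List.replicate n (1 : Int), List.range n)
  let dp := st.2.1
  let par := st.2.2
  let m := (PySem.List.max? dp (fun x => x)).getD 0
  let best := (PySem.List.index? dp m).getD 0
  (pvBackB words par n best []).reverse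

-- ===== PRECONDITION & SPEC =====
-- Pre_ excludes exactly the inputs on which A raises: the empty words list (words[-1]
-- IndexError) and n ≥ 2 with groups shorter than words (groups[i] IndexError).
def Pre_getWordsInLongestSubsequence (words : List String) (groups : List Int) : Prop :=
  words ≠ [] ∧ (words.length ≤ groups.length ∨ words.length = 1)
instance (words : List String) (groups : List Int) : Decidable (Pre_getWordsInLongestSubsequence words groups) := by unfold Pre_getWordsInLongestSubsequence; infer_instance

def pvWitness_getWordsInLongestSubsequence : List String × List Int :=
  (["bab", "dab", "cab"], [1, 2, 2])

def Spec_getWordsInLongestSubsequence (words : List String) (groups : List Int) (out : List String) : Prop := out = getWordsInLongestSubsequence_alt words groups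
instance (words : List String) (groups : List Int) (out : List String) : Decidable (Spec_getWordsInLongestSubsequence words groups out) := by unfold Spec_getWordsInLongestSubsequence; infer_instance

-- ===== CLAIM (what is proved, stated in full; the proofs are below) =====
def Claim_equal_getWordsInLongestSubsequence : Prop := ∀ (words : List String) (groups : List Int), Dom_getWordsInLongestSubsequence words groups → Pre_getWordsInLongestSubsequence words groups → Spec_getWordsInLongestSubsequence words groups (getWordsInLongestSubsequence words groups)

-- ===== LEMMAS AND PROOFS =====

-- proof-only abbreviations
def pvW (words : List String) (i : Nat) : List Char := (words.getD i "").toList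

def pvZ (dp : List Int) (par : List Nat) : List (Int × Int) :=
  List.zipWith (fun (a : Int) (b : Nat) => (a, (b : Int))) dp par

-- mismatch positions of u against v (over u's index range)
def pvDiffs (u v : List Char) : List Nat :=
  (List.range u.length).filter (fun k => !(u.getD k ' ' == v.getD k ' '))

-- A's admissibility test for a predecessor j of i (negation of the 'continue' guard)
def pvAdm (words : List String) (groups : List Int) (i : Nat) (j : Nat) : Bool :=
  !(groups.getD i 0 == groups.getD j 0)
    && ((words.getD i "").toList.length == (words.getD j "").toList.length)
    && (pvDistA (words.getD i "") (words.getD j "") == 1)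

def pvS (words : List String) (groups : List Int) (i : Nat) : List Nat :=
  (List.range i).filter (pvAdm words groups i)

-- B's loop state after processing indices 0..m-1
def pvStB (words : List String) (groups : List Int) (m : Nat) :
    PySem.Dict (Nat × List Char × List Char) (List Nat) × List Int × List Nat :=
  (List.range m).foldl (pvStepB words groups)
    (PySem.Dict.empty, List.replicate words.length (1 : Int), List.range words.length)

-- A's dp after processing indices 1..t
def pvStA (words : List String) (groups : List Int) (t : Nat) : List (Int × Int) :=
  (List.range' 1 t).foldl (pvStepA words groups)
    ((List.range words.length).map (fun (i : Nat) => ((1 : Int), (i : Int))))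

def pvInv (words : List String) (groups : List Int) (m : Nat) : Prop :=
  (pvStB words groups m).2.1.length = words.length ∧
  (pvStB words groups m).2.2.length = words.length ∧
  (∀ K, (pvStB words groups m).1.getD K []
      = (List.range m).filter (fun j => (pvKeysB (pvW words j)).contains K)) ∧
  (∀ j, 1 ≤ (pvStB words groups m).2.1.getD j 1) ∧
  (∀ j, (pvStB words groups m).2.2.getD j j ≤ j) ∧
  pvStA words groups (m - 1) = pvZ (pvStB words groups m).2.1 (pvStB words groups m).2.2

lemma pv_sum_ind {α : Type} (p : α → Bool) (l : List α) :
    (l.map (fun x => if p x then (1 : Nat) else 0)).sum = l.countP p := by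
  induction l with
  | nil => simp
  | cons a t ih =>
    by_cases h : p a
    · simp [h, ih, List.countP_cons]
      omega
    · simp [h, ih, List.countP_cons]


lemma pv_dist_aux (u v : List Char) (h : u.length = v.length) (acc : Int) :
    (List.zip u v).foldl (fun d c => if c.1 ≠ c.2 then d + 1 else d) acc
      = acc + ((pvDiffs u v).length : Int) := by
  induction u generalizing v acc with
  | nil =>
    cases v with
    | nil => simp [pvDiffs]
    | cons b v' => simp at h
  | cons a u' ih =>
    cases v with
    | nil => simp at h
    | cons b v' =>
      simp only [List.length_cons, Nat.succ_inj] at h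
      have hrec := ih v' h (if a ≠ b then acc + 1 else acc)
      simp only [List.zip_cons_cons, List.foldl_cons]
      rw [hrec]
      have hdiffs : (pvDiffs (a :: u') (b :: v')).length
          = (if a ≠ b then 1 else 0) + (pvDiffs u' v').length := by
        simp only [pvDiffs, List.length_cons, List.range_succ_eq_map]
        rw [List.filter_cons]
        by_cases hab : a = b
        · simp [hab, List.filter_map, Function.comp_def]
        · simp [hab, List.filter_map, Function.comp_def]
          omega
      rw [hdiffs]
      by_cases hab : a = b
      · simp [hab]
      · simp only [hab, ne_eq, not_false_eq_true, if_true, if_neg]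
        push_cast
        ring

lemma pvDistA_eq (s t : String) (h : s.toList.length = t.toList.length) :
    pvDistA s t = ((pvDiffs s.toList t.toList).length : Int) := by
  have := pv_dist_aux s.toList t.toList h 0
  simpa [pvDistA] using this

lemma pvKeysB_nodup (w : List Char) : (pvKeysB w).Nodup := by
  refine List.Nodup.map ?_ (List.nodup_range)
  intro a b hab
  simpa using congrArg (fun p => p.1) hab


lemma pvKeysB_mem (w : List Char) (K : Nat × List Char × List Char) :
    K ∈ pvKeysB w ↔ K.1 < w.length ∧ w.take K.1 = K.2.1 ∧ w.drop (K.1 + 1) = K.2.2 := by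
  obtain ⟨k, p, s⟩ := K
  simp only [pvKeysB, List.mem_map, List.mem_range, Prod.mk.injEq]
  constructor
  · rintro ⟨k', hk', rfl, rfl, rfl⟩
    exact ⟨hk', rfl, rfl⟩
  · rintro ⟨hk, h1, h2⟩
    exact ⟨k, hk, rfl, h1, h2⟩


lemma pv_slot (u v : List Char) (k : Nat) (hk : k < u.length) :
    (k < v.length ∧ v.take k = u.take k ∧ v.drop (k + 1) = u.drop (k + 1)
        ∧ ¬(v.getD k ' ' = u.getD k ' '))
      ↔ (u.length = v.length ∧ pvDiffs u v = [k]) := by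
  constructor
  · rintro ⟨hkv, htake, hdrop, hne⟩
    have hlen : u.length = v.length := by
      have hd := congrArg List.length hdrop
      have ht := congrArg List.length htake
      simp only [List.length_drop, List.length_take] at hd ht
      omega
    refine ⟨hlen, ?_⟩
    have hagree : ∀ m, m < u.length → m ≠ k → u.getD m ' ' = v.getD m ' ' := by
      intro m hm hmk
      rcases Nat.lt_or_ge m k with hlt | hge
      · have h1 : (v.take k)[m]? = (u.take k)[m]? := by rw [htake]
        rw [List.getElem?_take, List.getElem?_take, if_pos hlt, if_pos hlt] at h1
        rw [List.getD_eq_getElem?_getD, List.getD_eq_getElem?_getD, h1]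
      · have hgt : k + 1 ≤ m := by omega
        have h1 : (v.drop (k + 1))[m - (k + 1)]? = (u.drop (k + 1))[m - (k + 1)]? := by
          rw [hdrop]
        rw [List.getElem?_drop, List.getElem?_drop,
          (by omega : k + 1 + (m - (k + 1)) = m)] at h1
        rw [List.getD_eq_getElem?_getD, List.getD_eq_getElem?_getD, h1]
    unfold pvDiffs
    have hcong : List.filter (fun m => !(u.getD m ' ' == v.getD m ' ')) (List.range u.length)
        = List.filter (fun m => m == k) (List.range u.length) := by
      apply List.filter_congr
      intro m hm
      rw [List.mem_range] at hm
      by_cases hmk : m = k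
      · subst hmk
        rw [beq_self_eq_true, Bool.not_eq_true', beq_eq_false_iff_ne]
        exact fun hfoo => hne hfoo.symm
      · have hr : (m == k) = false := by simp [hmk]
        rw [hr, Bool.not_eq_false', beq_iff_eq]
        exact hagree m hm hmk
    rw [hcong, List.filter_beq, List.count_range, if_pos hk]
    simp
  · rintro ⟨hlen, hdiffs⟩
    have hkmem : k ∈ pvDiffs u v := by rw [hdiffs]; exact List.mem_singleton_self k
    unfold pvDiffs at hkmem
    rw [List.mem_filter, List.mem_range] at hkmem
    have hne : ¬(v.getD k ' ' = u.getD k ' ') := by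
      have := hkmem.2
      simp only [Bool.not_eq_true', beq_eq_false_iff_ne, ne_eq] at this
      exact fun hfoo => this hfoo.symm
    have hagree : ∀ m, m < u.length → m ≠ k → u.getD m ' ' = v.getD m ' ' := by
      intro m hm hmk
      by_contra hcon
      have : m ∈ pvDiffs u v := by
        unfold pvDiffs
        rw [List.mem_filter, List.mem_range]
        refine ⟨hm, ?_⟩
        simp only [Bool.not_eq_true', beq_eq_false_iff_ne, ne_eq]
        exact hcon
      rw [hdiffs, List.mem_singleton] at this
      exact hmk this
    have hagree? : ∀ m, m ≠ k → u[m]? = v[m]? := by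
      intro m hmk
      by_cases hm : m < u.length
      · have := hagree m hm hmk
        rw [List.getD_eq_getElem _ _ hm, List.getD_eq_getElem _ _ (hlen ▸ hm)] at this
        rw [List.getElem?_eq_getElem hm, List.getElem?_eq_getElem (hlen ▸ hm), this]
      · have h1 : u[m]? = none := List.getElem?_eq_none (by omega)
        have h2 : v[m]? = none := List.getElem?_eq_none (by omega)
        rw [h1, h2]
    refine ⟨by omega, ?_, ?_, hne⟩
    · apply List.ext_getElem?
      intro m
      rw [List.getElem?_take, List.getElem?_take]
      by_cases hmk : m < k
      · rw [if_pos hmk, if_pos hmk, (hagree? m (by omega)).symm]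
      · rw [if_neg hmk, if_neg hmk]
    · apply List.ext_getElem?
      intro m
      rw [List.getElem?_drop, List.getElem?_drop]
      exact (hagree? (k + 1 + m) (by omega)).symm

lemma pv_count_slots (u v : List Char) :
    List.countP (fun k => (pvKeysB v).contains (k, u.take k, u.drop (k + 1))
        && !(v.getD k ' ' == u.getD k ' ')) (List.range u.length)
      = if u.length = v.length ∧ (pvDiffs u v).length = 1 then 1 else 0 := by
  have hiff : ∀ k ∈ List.range u.length,
      (((pvKeysB v).contains (k, u.take k, u.drop (k + 1))
        && !(v.getD k ' ' == u.getD k ' ')) = true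
       ↔ (u.length = v.length ∧ pvDiffs u v = [k])) := by
    intro k hkmem
    rw [List.mem_range] at hkmem
    rw [← pv_slot u v k hkmem]
    rw [Bool.and_eq_true, List.contains_eq_mem, decide_eq_true_eq, pvKeysB_mem,
      Bool.not_eq_true', beq_eq_false_iff_ne]
    constructor
    · rintro ⟨⟨h1, h2, h3⟩, h4⟩
      exact ⟨h1, h2, h3, h4⟩
    · rintro ⟨h1, h2, h3, h4⟩
      exact ⟨⟨h1, h2, h3⟩, h4⟩
  by_cases hlen : u.length = v.length
  · rcases hd : pvDiffs u v with _ | ⟨k0, _ | ⟨k1, rest'⟩⟩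
    · rw [if_neg (by simp)]
      rw [List.countP_eq_zero]
      intro k hkmem
      rw [hiff k hkmem, hd]
      simp
    · rw [if_pos ⟨hlen, rfl⟩]
      have hk0 : k0 < u.length := by
        have hmem : k0 ∈ pvDiffs u v := by rw [hd]; exact List.mem_singleton_self k0
        unfold pvDiffs at hmem
        rw [List.mem_filter, List.mem_range] at hmem
        exact hmem.1
      have hpred : List.countP (fun k => (pvKeysB v).contains (k, u.take k, u.drop (k + 1))
          && !(v.getD k ' ' == u.getD k ' ')) (List.range u.length)
          = List.countP (fun k => k == k0) (List.range u.length) := by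
        rw [List.countP_eq_length_filter, List.countP_eq_length_filter]
        congr 1
        apply List.filter_congr
        intro k hkmem
        rw [Bool.eq_iff_iff, hiff k hkmem, hd]
        constructor
        · rintro ⟨-, hx⟩
          simp at hx
          simp [hx.symm]
        · intro hx
          rw [beq_iff_eq] at hx
          subst hx
          exact ⟨hlen, rfl⟩
      rw [hpred, ← List.count, List.count_range, if_pos hk0]
    · rw [if_neg (by simp)]
      rw [List.countP_eq_zero]
      intro k hkmem
      rw [hiff k hkmem, hd]
      simp
  · rw [if_neg (by tauto)]
    rw [List.countP_eq_zero]
    intro k hkmem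
    rw [hiff k hkmem]
    tauto

lemma pv_max?_id_perm {α : Type} [LinearOrder α] {l l' : List α} (h : l.Perm l') :
    PySem.List.max? l (fun x => x) = PySem.List.max? l' (fun x => x) := by
  rcases hl : PySem.List.max? l (fun x => x) with _ | m
  · have h0 : l = [] := (PySem.List.max?_eq_none_iff _ _).mp hl
    subst h0
    have h1 : l' = [] := h.symm.eq_nil
    subst h1
    rfl
  · rcases hl' : PySem.List.max? l' (fun x => x) with _ | m'
    · have h1 : l' = [] := (PySem.List.max?_eq_none_iff _ _).mp hl'
      subst h1
      have h0 : l = [] := h.eq_nil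
      rw [h0, (PySem.List.max?_eq_none_iff _ _).mpr rfl] at hl
      cases hl
    · have hm := PySem.List.max?_mem hl
      have hm' := PySem.List.max?_mem hl'
      have h1 := PySem.List.max?_isMax hl' m (h.mem_iff.mp hm)
      have h2 := PySem.List.max?_isMax hl m' (h.mem_iff.mpr hm')
      simp only [Option.some.injEq]
      exact le_antisymm h1 h2


lemma pv_min?_id_perm {α : Type} [LinearOrder α] {l l' : List α} (h : l.Perm l') :
    PySem.List.min? l (fun x => x) = PySem.List.min? l' (fun x => x) := by
  rcases hl : PySem.List.min? l (fun x => x) with _ | m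
  · have h0 : l = [] := (PySem.List.min?_eq_none_iff _ _).mp hl
    subst h0
    have h1 : l' = [] := h.symm.eq_nil
    subst h1
    rfl
  · rcases hl' : PySem.List.min? l' (fun x => x) with _ | m'
    · have h1 : l' = [] := (PySem.List.min?_eq_none_iff _ _).mp hl'
      subst h1
      have h0 : l = [] := h.eq_nil
      rw [h0, (PySem.List.min?_eq_none_iff _ _).mpr rfl] at hl
      cases hl
    · have hm := PySem.List.min?_mem hl
      have hm' := PySem.List.min?_mem hl'
      have h1 := PySem.List.min?_isMin hl' m (h.mem_iff.mp hm)
      have h2 := PySem.List.min?_isMin hl m' (h.mem_iff.mpr hm')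
      simp only [Option.some.injEq]
      exact le_antisymm h2 h1


lemma pv_foldl_min_le {α : Type} [LinearOrder α] (r : List α) (c : α) :
    r.foldl min c ≤ c := by
  induction r generalizing c with
  | nil => simp
  | cons a t ih => exact le_trans (ih (min c a)) (min_le_left c a)

lemma pv_scan_eq (dpv : Nat → Int) :
    ∀ (S : List Nat), S.Pairwise (· < ·) → (∀ j ∈ S, 1 ≤ dpv j) → S ≠ [] →
    S.foldl (fun s j => if dpv j > s.1 then (dpv j, (j : Int)) else s) ((-1 : Int), (-1 : Int))
      = ((PySem.List.max? (S.map dpv) (fun x => x)).getD 0,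
         (((PySem.List.min? (S.filter (fun j => dpv j
              == (PySem.List.max? (S.map dpv) (fun x => x)).getD 0)) (fun x => x)).getD 0 : Nat) : Int)) := by
  intro S
  induction S using List.reverseRecOn with
  | nil => intro _ _ hne; exact absurd rfl hne
  | append_singleton T b ih =>
    intro hS hpos _
    have hSp := List.pairwise_append.mp hS
    have hTb : ∀ a ∈ T, a < b := fun a ha => hSp.2.2 a ha b (by simp)
    have hposT : ∀ j ∈ T, 1 ≤ dpv j := fun j hj => hpos j (by simp [hj])
    have hposb : 1 ≤ dpv b := hpos b (by simp)
    by_cases hT : T = []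
    · subst hT
      simp only [List.nil_append, List.foldl_cons, List.foldl_nil, List.map_cons, List.map_nil]
      rw [if_pos (by omega : dpv b > (-1 : Int))]
      rw [PySem.List.max?_id_cons]
      simp only [List.foldl_nil, Option.getD_some]
      rw [List.filter_cons]
      simp [PySem.List.min?_id_cons]
    · obtain ⟨c, t, hTc⟩ : ∃ c t, T = c :: t := by
        cases T with
        | nil => exact absurd rfl hT
        | cons c t => exact ⟨c, t, rfl⟩
      obtain ⟨MT, hMT⟩ : ∃ M, PySem.List.max? (T.map dpv) (fun x => x) = some M := by
        rcases h : PySem.List.max? (T.map dpv) (fun x => x) with _ | M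
        · rw [PySem.List.max?_eq_none_iff, List.map_eq_nil_iff] at h
          exact absurd h hT
        · exact ⟨M, rfl⟩
      have ihT := ih hSp.1 hposT hT
      rw [List.foldl_append, ihT]
      simp only [hMT, Option.getD_some]
      have hMTmem : MT ∈ T.map dpv := PySem.List.max?_mem hMT
      have hMTmax : ∀ y ∈ T.map dpv, y ≤ MT := PySem.List.max?_isMax hMT
      have hmax' : PySem.List.max? ((T ++ [b]).map dpv) (fun x => x) = some (max MT (dpv b)) := by
        rw [hTc] at hMT ⊢
        simp only [List.map_cons, List.cons_append, List.map_append, List.map_nil] at hMT ⊢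
        rw [PySem.List.max?_id_cons] at hMT ⊢
        have heq := Option.some.inj hMT
        rw [List.foldl_append, heq]
        simp
      rw [hmax', Option.getD_some]
      simp only [List.foldl_cons, List.foldl_nil]
      by_cases hgt : dpv b > MT
      · rw [if_pos hgt]
        have hmaxr : max MT (dpv b) = dpv b := max_eq_right (le_of_lt hgt)
        rw [hmaxr]
        have hfilT : T.filter (fun j => dpv j == dpv b) = [] := by
          rw [List.filter_eq_nil_iff]
          intro j hj
          have : dpv j ≤ MT := hMTmax (dpv j) (List.mem_map_of_mem hj)
          simp only [beq_iff_eq]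
          omega
        rw [List.filter_append, hfilT, List.nil_append, List.filter_cons]
        simp [PySem.List.min?_id_cons]
      · rw [if_neg hgt]
        have hble : dpv b ≤ MT := by omega
        have hmaxl : max MT (dpv b) = MT := max_eq_left hble
        rw [hmaxl]
        rw [List.filter_append]
        obtain ⟨c0, t0, hfT⟩ : ∃ c0 t0, T.filter (fun j => dpv j == MT) = c0 :: t0 := by
          obtain ⟨y, hy1, hy2⟩ := List.mem_map.mp hMTmem
          have hymem : y ∈ T.filter (fun j => dpv j == MT) := by
            rw [List.mem_filter]
            exact ⟨hy1, by simp [hy2]⟩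
          cases hfe : T.filter (fun j => dpv j == MT) with
          | nil => rw [hfe] at hymem; cases hymem
          | cons c0 t0 => exact ⟨c0, t0, rfl⟩
        rw [hfT]
        have hc0T : c0 ∈ T := List.mem_of_mem_filter (by rw [hfT]; exact List.mem_cons_self)
        have hc0b : c0 < b := hTb c0 hc0T
        rw [List.cons_append]
        rw [PySem.List.min?_id_cons, PySem.List.min?_id_cons]
        simp only [Option.getD_some]
        rw [List.filter_cons]
        by_cases hbM : (dpv b == MT) = true
        · rw [if_pos hbM]
          simp only [List.filter_nil]
          rw [List.foldl_append]
          simp only [List.foldl_cons, List.foldl_nil]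
          have hminle : List.foldl min c0 t0 ≤ b :=
            le_of_lt (lt_of_le_of_lt (pv_foldl_min_le t0 c0) hc0b)
          rw [min_eq_left hminle]
        · rw [if_neg hbM]
          simp

lemma pv_bucket_fold (keys : List (Nat × List Char × List Char)) (hnd : keys.Nodup)
    (bk : PySem.Dict (Nat × List Char × List Char) (List Nat)) (i : Nat)
    (K : Nat × List Char × List Char) :
    (keys.foldl (fun d key => d.modify key [] (· ++ [i])) bk).getD K []
      = bk.getD K [] ++ (if keys.contains K then [i] else []) := by
  induction keys generalizing bk with
  | nil => simp
  | cons k0 rest ih =>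
    simp only [List.nodup_cons] at hnd
    simp only [List.foldl_cons]
    rw [ih hnd.2]
    rw [PySem.Dict.getD_modify]
    by_cases hK : K = k0
    · subst hK
      have hc : rest.contains K = false := by
        simp only [List.contains_eq_mem, decide_eq_false_iff_not]
        exact hnd.1
      simp [List.contains_cons, hnd.1]
    · simp only [if_neg hK, List.contains_cons]
      simp [or_iff_right hK]


lemma pv_cand_perm (words : List String) (groups : List Int) (m : Nat)
    (bk : PySem.Dict (Nat × List Char × List Char) (List Nat))
    (hbk : ∀ K, bk.getD K [] = (List.range m).filter (fun j => (pvKeysB (pvW words j)).contains K)) :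
    ((pvKeysB (pvW words m)).flatMap (fun key =>
      (bk.getD key []).filter (fun j =>
        !((words.getD j "").toList.getD key.1 ' ' == (pvW words m).getD key.1 ' ')
          && !(groups.getD j 0 == groups.getD m 0)))).Perm (pvS words groups m) := by
  rw [List.perm_iff_count]
  intro a
  rw [List.count_flatMap]
  have hcnt : ∀ (p : Nat → Bool) (l : List Nat),
      List.count a (l.filter p) = if p a then List.count a l else 0 := by
    intro p l
    by_cases h : p a
    · rw [List.count_filter h, if_pos h]
    · rw [if_neg h]
      apply List.count_eq_zero_of_not_mem
      intro hmem
      exact h (List.of_mem_filter hmem)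
  have hrhs : List.count a (pvS words groups m)
      = if pvAdm words groups m a then (if a < m then 1 else 0) else 0 := by
    unfold pvS
    rw [hcnt, List.count_range]
  rw [hrhs]
  by_cases ha : a < m
  · by_cases hg : (groups.getD a 0 == groups.getD m 0) = true
    · -- same group: everything vanishes
      have hadm : pvAdm words groups m a = false := by
        unfold pvAdm
        rw [beq_iff_eq] at hg
        rw [show (groups.getD m 0 == groups.getD a 0) = true from by
          rw [beq_iff_eq]; exact hg.symm]
        rfl
      rw [hadm]
      simp only [Bool.false_eq_true, if_false]
      apply List.sum_eq_zero
      intro x hx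
      obtain ⟨K, hK, rfl⟩ := List.mem_map.mp hx
      simp only [Function.comp_apply]
      rw [hbk K, hcnt, hcnt, List.count_range, hg]
      simp
    · -- different group and a < m: count the unique differing slot
      have hmap : ((pvKeysB (pvW words m)).map (List.count a ∘ fun key =>
          (bk.getD key []).filter (fun j =>
            !((words.getD j "").toList.getD key.1 ' ' == (pvW words m).getD key.1 ' ')
              && !(groups.getD j 0 == groups.getD m 0)))).sum
          = List.countP (fun k => (pvKeysB (pvW words a)).contains
                (k, (pvW words m).take k, (pvW words m).drop (k + 1))
              && !((pvW words a).getD k ' ' == (pvW words m).getD k ' '))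
              (List.range (pvW words m).length) := by
        have hKform : pvKeysB (pvW words m) = (List.range (pvW words m).length).map
            (fun k => (k, (pvW words m).take k, (pvW words m).drop (k + 1))) := rfl
        rw [hKform, List.map_map, ← pv_sum_ind]
        apply congrArg
        apply List.map_congr_left
        intro k hk
        simp only [Function.comp_apply]
        rw [hbk _, hcnt, hcnt, List.count_range]
        split_ifs <;> simp_all [pvW]
      rw [hmap, pv_count_slots]
      unfold pvAdm
      have hgsym : (groups.getD m 0 == groups.getD a 0) = false := by
        rw [beq_eq_false_iff_ne]
        rw [Bool.not_eq_true, beq_eq_false_iff_ne] at hg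
        exact fun hfoo => hg hfoo.symm
      rw [hgsym]
      simp only [Bool.not_false, Bool.true_and, if_pos ha]
      by_cases hlen : (pvW words m).length = (pvW words a).length
      · have hdist := pvDistA_eq (words.getD m "") (words.getD a "") hlen
        have hlenb : ((words.getD m "").toList.length == (words.getD a "").toList.length) = true := by
          rw [beq_iff_eq]
          exact hlen
        rw [hlenb, Bool.true_and, hdist]
        by_cases hone : (pvDiffs (pvW words m) (pvW words a)).length = 1
        · rw [if_pos ⟨hlen, hone⟩]
          have hcast : ((((pvDiffs (words.getD m "").toList (words.getD a "").toList).length : Int)) == 1) = true := by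
            rw [beq_iff_eq]
            rw [show pvDiffs (words.getD m "").toList (words.getD a "").toList
                = pvDiffs (pvW words m) (pvW words a) from rfl, hone]
            rfl
          rw [hcast]
          rfl
        · rw [if_neg (fun hfoo => hone hfoo.2)]
          have hcast : ((((pvDiffs (words.getD m "").toList (words.getD a "").toList).length : Int)) == 1) = false := by
            rw [beq_eq_false_iff_ne]
            intro hfoo
            apply hone
            exact_mod_cast hfoo
          rw [hcast]
          rfl
      · rw [if_neg (fun hfoo => hlen hfoo.1)]
        have hlenb : ((words.getD m "").toList.length == (words.getD a "").toList.length) = false := by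
          rw [beq_eq_false_iff_ne]
          exact hlen
        rw [hlenb]
        rfl
  · -- a ≥ m: both sides zero
    rw [if_neg ha]
    simp only [ite_self]
    apply List.sum_eq_zero
    intro x hx
    obtain ⟨K, hK, rfl⟩ := List.mem_map.mp hx
    simp only [Function.comp_apply]
    rw [hbk K, hcnt, hcnt, List.count_range, if_neg ha]
    simp

lemma pv_zip_getD (dp : List Int) (par : List Nat) (h : dp.length = par.length)
    (j : Nat) (hj : j < dp.length) :
    (pvZ dp par).getD j (1, 0) = (dp.getD j 1, (par.getD j j : Int)) := by
  have hz : j < (pvZ dp par).length := by simp [pvZ, List.length_zipWith]; omega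
  rw [List.getD_eq_getElem _ _ hz, List.getD_eq_getElem _ _ hj,
    List.getD_eq_getElem _ _ (by omega : j < par.length)]
  simp only [pvZ]
  rw [List.getElem_zipWith]


lemma pv_zip_set (dp : List Int) (par : List Nat) (i : Nat) (a : Int) (b : Nat) :
    pvZ (dp.set i a) (par.set i b) = (pvZ dp par).set i (a, (b : Int)) := by
  induction dp generalizing par i with
  | nil => simp [pvZ]
  | cons x t ih =>
    cases par with
    | nil => simp [pvZ]
    | cons y r =>
      cases i with
      | zero => simp [pvZ]
      | succ i' => simpa [pvZ] using ih r i'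


lemma pv_zip_fst (dp : List Int) (par : List Nat) (h : dp.length = par.length) :
    (pvZ dp par).map (·.1) = dp := by
  induction dp generalizing par with
  | nil => simp [pvZ]
  | cons x t ih =>
    cases par with
    | nil => simp at h
    | cons y r =>
      simp only [List.length_cons, Nat.succ_inj] at h
      simpa [pvZ] using ih r h


lemma pv_candB_perm (words : List String) (groups : List Int) (m : Nat)
    (bk : PySem.Dict (Nat × List Char × List Char) (List Nat))
    (hbk : ∀ K, bk.getD K [] = (List.range m).filter (fun j => (pvKeysB (pvW words j)).contains K)) :
    (pvCandB words groups bk m).Perm (pvS words groups m) :=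
  pv_cand_perm words groups m bk hbk

lemma pv_stepB_empty (words : List String) (groups : List Int)
    (st : PySem.Dict (Nat × List Char × List Char) (List Nat) × List Int × List Nat) (i : Nat)
    (h : (pvCandB words groups st.1 i).isEmpty = true) :
    pvStepB words groups st i
      = ((pvKeysB ((words.getD i "").toList)).foldl (fun d key => d.modify key [] (· ++ [i])) st.1,
         st.2.1, st.2.2) := by
  simp only [pvStepB]
  rw [if_pos h]

lemma pv_stepB_nonempty (words : List String) (groups : List Int)
    (st : PySem.Dict (Nat × List Char × List Char) (List Nat) × List Int × List Nat) (i : Nat)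
    (h : (pvCandB words groups st.1 i).isEmpty = false) :
    pvStepB words groups st i
      = ((pvKeysB ((words.getD i "").toList)).foldl (fun d key => d.modify key [] (· ++ [i])) st.1,
         st.2.1.set i ((PySem.List.max? ((pvCandB words groups st.1 i).map
              (fun j => st.2.1.getD j 1)) (fun x => x)).getD 0 + 1),
         st.2.2.set i ((PySem.List.min? ((pvCandB words groups st.1 i).filter
              (fun j => (st.2.1.set i ((PySem.List.max? ((pvCandB words groups st.1 i).map
                  (fun j => st.2.1.getD j 1)) (fun x => x)).getD 0 + 1)).getD j 1
                == (PySem.List.max? ((pvCandB words groups st.1 i).map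
                  (fun j => st.2.1.getD j 1)) (fun x => x)).getD 0)) (fun x => x)).getD 0)) := by
  simp only [pvStepB]
  rw [h]
  simp

lemma pv_bucket_inv_step (words : List String) (groups : List Int) (m : Nat)
    (bk : PySem.Dict (Nat × List Char × List Char) (List Nat))
    (hbk : ∀ K, bk.getD K [] = (List.range m).filter (fun j => (pvKeysB (pvW words j)).contains K)) :
    ∀ K, ((pvKeysB ((words.getD m "").toList)).foldl (fun d key => d.modify key [] (· ++ [m])) bk).getD K []
      = (List.range (m + 1)).filter (fun j => (pvKeysB (pvW words j)).contains K) := by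
  intro K
  rw [pv_bucket_fold _ (pvKeysB_nodup _) _ _ K, hbk K, List.range_succ, List.filter_append]
  congr 1
  simp only [List.filter_cons, List.filter_nil]
  rfl

lemma pv_getD_set_self {α : Type} (l : List α) (i : Nat) (v d : α) (hi : i < l.length) :
    (l.set i v).getD i d = v := by
  rw [List.getD_eq_getElem _ _ (by simp [hi])]
  simp [List.getElem_set_self, hi]

lemma pv_getD_set_ne {α : Type} (l : List α) (i j : Nat) (v d : α) (hij : i ≠ j) :
    (l.set i v).getD j d = l.getD j d := by
  rw [List.getD_eq_getElem?_getD, List.getD_eq_getElem?_getD, List.getElem?_set_ne hij]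

lemma pv_stB_succ (words : List String) (groups : List Int) (m : Nat) :
    pvStB words groups (m + 1) = pvStepB words groups (pvStB words groups m) m := by
  unfold pvStB
  rw [List.range_succ, List.foldl_append]
  rfl

lemma pv_stA_succ (words : List String) (groups : List Int) (t : Nat) :
    pvStA words groups (t + 1) = pvStepA words groups (pvStA words groups t) (t + 1) := by
  unfold pvStA
  rw [List.range'_concat, List.foldl_append]
  simp only [List.foldl_cons, List.foldl_nil]
  rw [show 1 + 1 * t = t + 1 by omega]

lemma pv_inv_all (words : List String) (groups : List Int) :
    ∀ m, m ≤ words.length → pvInv words groups m := by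
  intro m
  induction m with
  | zero =>
    intro _
    refine ⟨by simp [pvStB], by simp [pvStB], ?_, ?_, ?_, ?_⟩
    · intro K
      simp [pvStB, PySem.Dict.getD_empty]
    · intro j
      show 1 ≤ (List.replicate words.length (1 : Int)).getD j 1
      by_cases hj : j < words.length
      · rw [List.getD_eq_getElem _ _ (by simpa using hj)]
        simp
      · rw [List.getD_eq_getElem?_getD, List.getElem?_eq_none (by simpa using hj)]
        simp
    · intro j
      show (List.range words.length).getD j j ≤ j
      by_cases hj : j < words.length
      · rw [List.getD_eq_getElem _ _ (by simpa using hj)]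
        simp
      · rw [List.getD_eq_getElem?_getD, List.getElem?_eq_none (by simpa using hj)]
        simp
    · show pvStA words groups 0 = pvZ (List.replicate words.length 1) (List.range words.length)
      unfold pvStA
      simp only [List.range'_zero, List.foldl_nil]
      apply List.ext_getElem
      · simp [pvZ]
      · intro j h1 h2
        simp [pvZ]
  | succ m ih =>
    intro hm1
    have hmn : m < words.length := by omega
    obtain ⟨hlen1, hlen2, hbk, hdp, hpar, hA⟩ := ih (by omega)
    have hperm := pv_candB_perm words groups m (pvStB words groups m).1 hbk
    have hbk' := pv_bucket_inv_step words groups m (pvStB words groups m).1 hbk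
    -- A's inner scan as a fold over the admissible set
    have hdpv : ∀ j, ((pvZ (pvStB words groups m).2.1 (pvStB words groups m).2.2).getD j (1, 0)).1
        = (pvStB words groups m).2.1.getD j 1 := by
      intro j
      by_cases hj : j < (pvStB words groups m).2.1.length
      · rw [pv_zip_getD _ _ (by rw [hlen1, hlen2]) j hj]
      · have hz : (pvZ (pvStB words groups m).2.1 (pvStB words groups m).2.2).length ≤ j := by
          simp only [pvZ, List.length_zipWith]
          omega
        rw [List.getD_eq_getElem?_getD, List.getElem?_eq_none hz]
        rw [List.getD_eq_getElem?_getD, List.getElem?_eq_none (by omega)]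
        rfl
    have hguard : ∀ j, (groups.getD m 0 == groups.getD j 0
          || !((words.getD m "").toList.length == (words.getD j "").toList.length)
          || !(pvDistA (words.getD m "") (words.getD j "") == 1))
        = !(pvAdm words groups m j) := by
      intro j
      unfold pvAdm
      cases groups.getD m 0 == groups.getD j 0 <;>
        cases ((words.getD m "").toList.length == (words.getD j "").toList.length) <;>
        cases (pvDistA (words.getD m "") (words.getD j "") == 1) <;> rfl
    have hscan : (List.range m).foldl (fun s j =>
        if groups.getD m 0 == groups.getD j 0
            || !((words.getD m "").toList.length == (words.getD j "").toList.length)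
            || !(pvDistA (words.getD m "") (words.getD j "") == 1) then s
        else if ((pvZ (pvStB words groups m).2.1 (pvStB words groups m).2.2).getD j (1, 0)).1 > s.1
          then (((pvZ (pvStB words groups m).2.1 (pvStB words groups m).2.2).getD j (1, 0)).1, (j : Int))
          else s)
        ((-1 : Int), (-1 : Int))
        = (pvS words groups m).foldl (fun s j =>
            if (pvStB words groups m).2.1.getD j 1 > s.1
              then ((pvStB words groups m).2.1.getD j 1, (j : Int)) else s) ((-1 : Int), (-1 : Int)) := by
      unfold pvS
      rw [List.foldl_filter]
      have hfun : (fun (s : Int × Int) (j : Nat) =>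
          if groups.getD m 0 == groups.getD j 0
              || !((words.getD m "").toList.length == (words.getD j "").toList.length)
              || !(pvDistA (words.getD m "") (words.getD j "") == 1) then s
          else if ((pvZ (pvStB words groups m).2.1 (pvStB words groups m).2.2).getD j (1, 0)).1 > s.1
            then (((pvZ (pvStB words groups m).2.1 (pvStB words groups m).2.2).getD j (1, 0)).1, (j : Int))
            else s)
          = (fun (s : Int × Int) (j : Nat) => if pvAdm words groups m j = true then
              (if (pvStB words groups m).2.1.getD j 1 > s.1
                then ((pvStB words groups m).2.1.getD j 1, (j : Int)) else s) else s) := by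
        funext s j
        rw [hguard j, hdpv j]
        cases hAj : pvAdm words groups m j <;> simp
      rw [hfun]
    unfold pvInv
    by_cases hc : (pvCandB words groups (pvStB words groups m).1 m).isEmpty
    · -- no admissible predecessor: nothing changes
      have hSe : pvS words groups m = [] := by
        have hce : pvCandB words groups (pvStB words groups m).1 m = [] := List.isEmpty_iff.mp hc
        rw [hce] at hperm
        exact (List.Perm.nil_eq hperm).symm
      rw [pv_stB_succ, pv_stepB_empty words groups _ m hc]
      refine ⟨hlen1, hlen2, hbk', hdp, hpar, ?_⟩
      show pvStA words groups (m + 1 - 1) = pvZ (pvStB words groups m).2.1 (pvStB words groups m).2.2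
      cases m with
      | zero => exact hA
      | succ t =>
        have hAt : pvStA words groups t
            = pvZ (pvStB words groups (t + 1)).2.1 (pvStB words groups (t + 1)).2.2 := hA
        show pvStA words groups (t + 1) = _
        rw [pv_stA_succ, hAt]
        simp only [pvStepA]
        rw [hscan, hSe]
        simp
    · have hcf : (pvCandB words groups (pvStB words groups m).1 m).isEmpty = false := by
        rwa [Bool.not_eq_true] at hc
      have hcne : pvCandB words groups (pvStB words groups m).1 m ≠ [] := by
        intro h
        rw [h] at hcf
        simp at hcf
      have hSne : pvS words groups m ≠ [] := by
        intro h
        rw [h] at hperm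
        exact hcne (List.Perm.eq_nil hperm)
      have hSpw : (pvS words groups m).Pairwise (· < ·) :=
        List.Pairwise.sublist List.filter_sublist List.pairwise_lt_range
      have hfold := pv_scan_eq (fun j => (pvStB words groups m).2.1.getD j 1) (pvS words groups m)
        hSpw (fun j _ => hdp j) hSne
      have hmax_eq : PySem.List.max? ((pvCandB words groups (pvStB words groups m).1 m).map
            (fun j => (pvStB words groups m).2.1.getD j 1)) (fun x => x)
          = PySem.List.max? ((pvS words groups m).map
            (fun j => (pvStB words groups m).2.1.getD j 1)) (fun x => x) :=
        pv_max?_id_perm (hperm.map _)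
      obtain ⟨MM, hMM⟩ : ∃ M, PySem.List.max? ((pvS words groups m).map
          (fun j => (pvStB words groups m).2.1.getD j 1)) (fun x => x) = some M := by
        rcases hq : PySem.List.max? ((pvS words groups m).map
            (fun j => (pvStB words groups m).2.1.getD j 1)) (fun x => x) with _ | M
        · rw [PySem.List.max?_eq_none_iff, List.map_eq_nil_iff] at hq
          exact absurd hq hSne
        · exact ⟨M, rfl⟩
      obtain ⟨j0, hj0S, hj0⟩ := List.mem_map.mp (PySem.List.max?_mem hMM)
      have hMM1 : 1 ≤ MM := by
        rw [← hj0]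
        exact hdp j0
      have hfc : (pvCandB words groups (pvStB words groups m).1 m).filter
            (fun j => ((pvStB words groups m).2.1.set m (MM + 1)).getD j 1 == MM)
          = (pvCandB words groups (pvStB words groups m).1 m).filter
            (fun j => (pvStB words groups m).2.1.getD j 1 == MM) := by
        apply List.filter_congr
        intro j hj
        have hjS := hperm.mem_iff.mp hj
        have hjm : j < m := by
          unfold pvS at hjS
          have hjr := (List.mem_filter.mp hjS).1
          simpa using hjr
        rw [pv_getD_set_ne _ _ _ _ _ (by omega)]
      have hmin_eq : PySem.List.min? ((pvCandB words groups (pvStB words groups m).1 m).filter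
            (fun j => (pvStB words groups m).2.1.getD j 1 == MM)) (fun x => x)
          = PySem.List.min? ((pvS words groups m).filter
            (fun j => (pvStB words groups m).2.1.getD j 1 == MM)) (fun x => x) :=
        pv_min?_id_perm (hperm.filter _)
      obtain ⟨PP, hPP⟩ : ∃ P, PySem.List.min? ((pvS words groups m).filter
          (fun j => (pvStB words groups m).2.1.getD j 1 == MM)) (fun x => x) = some P := by
        rcases hq : PySem.List.min? ((pvS words groups m).filter
            (fun j => (pvStB words groups m).2.1.getD j 1 == MM)) (fun x => x) with _ | P
        · rw [PySem.List.min?_eq_none_iff, List.filter_eq_nil_iff] at hq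
          exact absurd (beq_iff_eq.mpr hj0) (hq j0 hj0S)
        · exact ⟨P, rfl⟩
      have hPPS := PySem.List.min?_mem hPP
      have hPPm : PP < m := by
        have hPS := List.mem_of_mem_filter hPPS
        unfold pvS at hPS
        have hPr := (List.mem_filter.mp hPS).1
        simpa using hPr
      rw [pv_stB_succ, pv_stepB_nonempty words groups _ m hcf]
      rw [hmax_eq, hMM]
      simp only [Option.getD_some]
      rw [hfc, hmin_eq, hPP]
      simp only [Option.getD_some]
      refine ⟨by simpa using hlen1, by simpa using hlen2, hbk', ?_, ?_, ?_⟩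
      · intro j
        by_cases hjm : j = m
        · subst hjm
          rw [pv_getD_set_self _ _ _ _ (by rw [hlen1]; exact hmn)]
          omega
        · rw [pv_getD_set_ne _ _ _ _ _ (fun h => hjm h.symm)]
          exact hdp j
      · intro j
        by_cases hjm : j = m
        · subst hjm
          rw [pv_getD_set_self _ _ _ _ (by rw [hlen2]; exact hmn)]
          omega
        · rw [pv_getD_set_ne _ _ _ _ _ (fun h => hjm h.symm)]
          exact hpar j
      · show pvStA words groups (m + 1 - 1)
            = pvZ ((pvStB words groups m).2.1.set m (MM + 1)) ((pvStB words groups m).2.2.set m PP)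
        rw [pv_zip_set]
        cases m with
        | zero => exact absurd rfl hSne
        | succ t =>
          have hAt : pvStA words groups t
              = pvZ (pvStB words groups (t + 1)).2.1 (pvStB words groups (t + 1)).2.2 := hA
          show pvStA words groups (t + 1) = _
          rw [pv_stA_succ, hAt]
          simp only [pvStepA]
          rw [hscan, hfold, hMM]
          simp only [Option.getD_some]
          rw [hPP]
          simp only [Option.getD_some]
          have hMMne : (MM == (-1 : Int)) = false := by
            rw [beq_eq_false_iff_ne]
            omega
          rw [hMMne]
          simp

lemma pv_best :
    ∀ (dl : List (Int × Int)), dl ≠ [] → (∀ p ∈ dl, 1 ≤ p.1) →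
    (PySem.List.enumerate dl).foldl
        (fun (s : (Int × Int) × Int) p => if p.2.1 > s.1.1 then (p.2, p.1) else s)
        (((-1 : Int), (-1 : Int)), (-1 : Int))
      = (dl.getD ((PySem.List.index? (dl.map (·.1))
            ((PySem.List.max? (dl.map (·.1)) (fun x => x)).getD 0)).getD 0) ((1 : Int), (0 : Int)),
         (((PySem.List.index? (dl.map (·.1))
            ((PySem.List.max? (dl.map (·.1)) (fun x => x)).getD 0)).getD 0 : Nat) : Int)) := by
  intro dl
  induction dl using List.reverseRecOn with
  | nil => intro hne _; exact absurd rfl hne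
  | append_singleton T x ih =>
    intro _ hpos
    have hposT : ∀ p ∈ T, 1 ≤ p.1 := fun p hp => hpos p (by simp [hp])
    have hposx : 1 ≤ x.1 := hpos x (by simp)
    rw [PySem.List.enumerate_append, List.foldl_append]
    have hsing : PySem.List.enumerate [x] ((0 : Int) + (T.length : Int)) = [(((T.length : Nat) : Int), x)] := by
      rw [PySem.List.enumerate_cons, PySem.List.enumerate_nil]
      norm_num
    rw [hsing]
    simp only [List.foldl_cons, List.foldl_nil]
    by_cases hT : T = []
    · subst hT
      simp only [PySem.List.enumerate_nil, List.foldl_nil, List.nil_append, List.map_cons,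
        List.map_nil, List.length_nil, Nat.cast_zero]
      rw [if_pos (by omega : x.1 > (-1 : Int))]
      rw [PySem.List.max?_id_cons]
      simp only [List.foldl_nil, Option.getD_some]
      rw [PySem.List.index?_cons_self]
      simp
    · obtain ⟨MT, hMT⟩ : ∃ M, PySem.List.max? (T.map (·.1)) (fun x => x) = some M := by
        rcases h : PySem.List.max? (T.map (·.1)) (fun x => x) with _ | M
        · rw [PySem.List.max?_eq_none_iff, List.map_eq_nil_iff] at h
          exact absurd h hT
        · exact ⟨M, h⟩
      have hMTmem : MT ∈ T.map (·.1) := PySem.List.max?_mem hMT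
      have hMTmax : ∀ y ∈ T.map (·.1), y ≤ MT := PySem.List.max?_isMax hMT
      obtain ⟨k, hk⟩ : ∃ k, PySem.List.index? (T.map (·.1)) MT = some k := by
        rcases h : PySem.List.index? (T.map (·.1)) MT with _ | k
        · rw [PySem.List.index?_eq_none_iff] at h
          exact absurd hMTmem h
        · exact ⟨k, h⟩
      obtain ⟨hklt', hTk, -⟩ := PySem.List.getElem_of_index?_eq_some hk
      have hklt : k < T.length := by simpa using hklt'
      have hval : (T.getD k (1, 0)).1 = MT := by
        rw [List.getD_eq_getElem _ _ hklt]
        rw [← hTk, List.getElem_map]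
      have ihT := ih hT hposT
      rw [ihT]
      simp only [hMT, Option.getD_some, hk]
      rw [hval]
      have hmax' : PySem.List.max? ((T ++ [x]).map (·.1)) (fun y => y) = some (max MT x.1) := by
        obtain ⟨c, t, hTc⟩ : ∃ c t, T = c :: t := by
          cases T with
          | nil => exact absurd rfl hT
          | cons c t => exact ⟨c, t, rfl⟩
        rw [hTc] at hMT ⊢
        simp only [List.map_cons, List.cons_append, List.map_append, List.map_nil] at hMT ⊢
        rw [PySem.List.max?_id_cons] at hMT ⊢
        have heq := Option.some.inj hMT
        rw [List.foldl_append, heq]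
        simp
      rw [List.map_append, List.map_cons, List.map_nil] at hmax' ⊢
      rw [hmax', Option.getD_some]
      by_cases hgt : x.1 > MT
      · rw [if_pos hgt]
        have hmaxr : max MT x.1 = x.1 := max_eq_right (le_of_lt hgt)
        rw [hmaxr]
        have hnotmem : x.1 ∉ T.map (·.1) := by
          intro hmem
          have := hMTmax x.1 hmem
          omega
        rw [PySem.List.index?_append_singleton_self _ _ hnotmem]
        simp only [Option.getD_some, List.length_map]
        rw [List.getD_eq_getElem _ _ (by simp : T.length < (T ++ [x]).length)]
        rw [List.getElem_concat_length]
        rfl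
      · rw [if_neg hgt]
        have hble : x.1 ≤ MT := by omega
        rw [max_eq_left hble]
        rw [PySem.List.index?_append_of_mem [x.1] hMTmem]
        rw [hk]
        simp only [Option.getD_some]
        rw [List.getD_append _ _ _ _ hklt]

lemma pv_best_lt (dl : List Int) (hne : dl ≠ []) :
    ((PySem.List.index? dl ((PySem.List.max? dl (fun x => x)).getD 0)).getD 0) < dl.length := by
  rcases hl : PySem.List.max? dl (fun x => x) with _ | m
  · exact absurd ((PySem.List.max?_eq_none_iff _ _).mp hl) hne
  · simp only [Option.getD_some]
    rcases hi : PySem.List.index? dl m with _ | k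
    · rw [PySem.List.index?_eq_none_iff] at hi
      exact absurd (PySem.List.max?_mem hl) hi
    · simp only [Option.getD_some]
      rw [PySem.List.index?_eq_some_iff] at hi
      obtain ⟨pre, suf, rfl, hlen, -⟩ := hi
      simp only [List.length_append, List.length_cons, ← hlen]
      omega


lemma pv_back (words : List String) (dp : List Int) (par : List Nat)
    (h1 : dp.length = words.length) (h2 : par.length = words.length)
    (hpar : ∀ j, par.getD j j ≤ j) :
    ∀ fuel i acc, i < fuel → i < words.length →
      pvBackA words (pvZ dp par) fuel (i : Int) ((pvZ dp par).getD i (1, 0))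
          (acc ++ [words.getD i ""])
        = pvBackB words par fuel i acc := by
  intro fuel
  induction fuel with
  | zero =>
    intro i acc hif _
    omega
  | succ f ih =>
    intro i acc hif hin
    rw [pv_zip_getD dp par (by omega) i (by omega)]
    simp only [pvBackA, pvBackB]
    by_cases hiq : par.getD i i = i
    · have hbA : ((i : Int) == ((par.getD i i : Nat) : Int)) = true := by
        rw [beq_iff_eq, hiq]
      have hbB : ((par.getD i i : Nat) == i) = true := by
        rw [beq_iff_eq, hiq]
      rw [hbA, hbB]
      simp
    · have hbA : ((i : Int) == ((par.getD i i : Nat) : Int)) = false := by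
        rw [beq_eq_false_iff_ne]
        intro hfoo
        exact hiq (by exact_mod_cast hfoo.symm)
      have hbB : ((par.getD i i : Nat) == i) = false := by
        rw [beq_eq_false_iff_ne]
        exact hiq
      rw [hbA, hbB]
      simp only [Bool.false_eq_true, if_false]
      have hqi : par.getD i i < i := lt_of_le_of_ne (hpar i) hiq
      have hrec := ih (par.getD i i) (acc ++ [words.getD i ""]) (by omega) (by omega)
      rw [Int.toNat_natCast]
      exact hrec



theorem pv_witness_ok :
    Dom_getWordsInLongestSubsequence pvWitness_getWordsInLongestSubsequence.1 pvWitness_getWordsInLongestSubsequence.2 ∧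
    Pre_getWordsInLongestSubsequence pvWitness_getWordsInLongestSubsequence.1 pvWitness_getWordsInLongestSubsequence.2 := by
  constructor <;> decide

-- ===== VERDICT (by name: the statement is the Claim_ definition above) =====
theorem getWordsInLongestSubsequence_spec : Claim_equal_getWordsInLongestSubsequence := by
  intro words groups _ hpre
  unfold Spec_getWordsInLongestSubsequence
  obtain ⟨hne, -⟩ := hpre
  have hn1 : 0 < words.length := List.length_pos_iff.mpr hne
  obtain ⟨hlen1, hlen2, hbk, hdp, hpar, hA⟩ := pv_inv_all words groups words.length le_rfl
  have hdlen : (pvZ (pvStB words groups words.length).2.1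
      (pvStB words groups words.length).2.2).length = words.length := by
    simp only [pvZ, List.length_zipWith]
    rw [hlen1, hlen2]
    simp
  have hzne : pvZ (pvStB words groups words.length).2.1
      (pvStB words groups words.length).2.2 ≠ [] := by
    intro h
    rw [h] at hdlen
    simp only [List.length_nil] at hdlen
    omega
  have hzpos : ∀ p ∈ pvZ (pvStB words groups words.length).2.1
      (pvStB words groups words.length).2.2, 1 ≤ p.1 := by
    intro p hp
    obtain ⟨k, hk, rfl⟩ := List.mem_iff_getElem.mp hp
    have hkd : k < (pvStB words groups words.length).2.1.length := by
      rw [hdlen] at hk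
      rw [hlen1]
      omega
    simp only [pvZ, List.getElem_zipWith]
    rw [← List.getD_eq_getElem (pvStB words groups words.length).2.1 1 hkd]
    exact hdp k
  have hdBne : (pvStB words groups words.length).2.1 ≠ [] := by
    intro h
    rw [h] at hlen1
    simp at hlen1
    omega
  have hstB : (List.range words.length).foldl (pvStepB words groups)
      (PySem.Dict.empty, List.replicate words.length (1 : Int), List.range words.length)
      = pvStB words groups words.length := rfl
  have hdpA : (List.range' 1 (words.length - 1)).foldl (pvStepA words groups)
      ((List.range words.length).map (fun (i : Nat) => ((1 : Int), (i : Int))))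
      = pvZ (pvStB words groups words.length).2.1 (pvStB words groups words.length).2.2 := hA
  simp only [getWordsInLongestSubsequence, getWordsInLongestSubsequence_alt]
  rw [hstB, hdpA]
  rw [pv_best _ hzne hzpos]
  rw [pv_zip_fst _ _ (hlen1.trans hlen2.symm)]
  have hilt := pv_best_lt (pvStB words groups words.length).2.1 hdBne
  rw [hlen1] at hilt
  have hback := pv_back words (pvStB words groups words.length).2.1
    (pvStB words groups words.length).2.2 hlen1 hlen2 hpar words.length
    ((PySem.List.index? (pvStB words groups words.length).2.1
      ((PySem.List.max? (pvStB words groups words.length).2.1 (fun x => x)).getD 0)).getD 0)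
    [] hilt hilt
  rw [List.nil_append] at hback
  simp only [Int.toNat_natCast]
  rw [hback]
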